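-- pv_equiv track=rewrite | github.com/cymerrad/sams-task | main.py | silent_ranges
-- ===== SOURCE A (Python) =====
-- def silent_ranges(rle, boolz):
--     cur = 0
--     ranges = []
--     for z in zip(rle, boolz):
--         if z[1] == True :
--             ranges.append((cur, cur+z[0]))
--         cur += z[0] # always move the head to the right
--
--     return ranges
-- ===== SOURCE B (Python) =====
-- from itertools import accumulate
--
-- def silent_ranges(rle, boolz):
--     pairs = list(zip(rle, boolz))
--     starts = list(accumulate((p[0] for p in pairs), initial=0))
--     return [(starts[i], starts[i] + pairs[i][0])
--             for i in range(len(pairs)) if pairs[i][1] == True]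
-- ===== Notes on version B (the rewrite author's own statement) =====
-- stated objective: alternative
-- what changed: Replaces the single interleaved accumulate-and-append loop with a prefix-sum table (itertools.accumulate) built in one pass, followed by an index-based filtering comprehension over the precomputed start offsets.
import Mathlib
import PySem

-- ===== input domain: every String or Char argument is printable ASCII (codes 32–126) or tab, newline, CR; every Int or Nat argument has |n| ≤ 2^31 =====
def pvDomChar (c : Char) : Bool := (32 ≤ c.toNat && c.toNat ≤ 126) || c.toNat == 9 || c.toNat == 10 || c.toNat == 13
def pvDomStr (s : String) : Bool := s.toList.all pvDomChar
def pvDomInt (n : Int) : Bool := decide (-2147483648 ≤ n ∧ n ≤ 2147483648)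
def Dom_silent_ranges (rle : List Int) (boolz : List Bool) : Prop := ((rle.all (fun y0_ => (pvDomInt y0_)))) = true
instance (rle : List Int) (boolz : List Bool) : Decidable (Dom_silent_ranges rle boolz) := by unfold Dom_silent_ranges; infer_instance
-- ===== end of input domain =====

-- B replaces A's interleaved accumulate-and-append loop by a prefix-sum (scanl) table
-- followed by an index-based filtering pass; alternative decomposition, same cost.


-- ===== PORT A =====
-- for z in zip(rle, boolz): if z[1] == True: append (cur, cur+z[0]); cur += z[0]
def silent_ranges (rle : List Int) (boolz : List Bool) : List (Int × Int) :=
  ((List.zip rle boolz).foldl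
    (fun s z => (s.1 + z.1, if z.2 == true then s.2 ++ [(s.1, s.1 + z.1)] else s.2))
    ((0 : Int), ([] : List (Int × Int)))).2

-- ===== PORT B =====
-- pairs = list(zip(rle, boolz)); starts = accumulate(firsts, initial=0);
-- comprehension over range(len(pairs)) filtered by pairs[i][1] == True.
-- All indices i are in range, so Python's starts[i]/pairs[i] are ported as getD.
def silent_ranges_alt (rle : List Int) (boolz : List Bool) : List (Int × Int) :=
  let pairs := List.zip rle boolz
  let starts := List.scanl (fun c p => c + p) 0 (pairs.map Prod.fst)
  (List.range pairs.length).filterMap (fun i =>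
    if (pairs.getD i ((0 : Int), false)).2 == true then
      some (starts.getD i 0, starts.getD i 0 + (pairs.getD i ((0 : Int), false)).1)
    else none)

-- ===== PRECONDITION & SPEC =====
def Spec_silent_ranges (rle : List Int) (boolz : List Bool) (out : List (Int × Int)) : Prop := out = silent_ranges_alt rle boolz
instance (rle : List Int) (boolz : List Bool) (out : List (Int × Int)) : Decidable (Spec_silent_ranges rle boolz out) := by unfold Spec_silent_ranges; infer_instance

-- ===== CLAIM (what is proved, stated in full; the proofs are below) =====
def Claim_equal_silent_ranges : Prop := ∀ (rle : List Int) (boolz : List Bool), Dom_silent_ranges rle boolz → Spec_silent_ranges rle boolz (silent_ranges rle boolz)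

-- ===== LEMMAS AND PROOFS =====

-- reference recursion both ports are reduced to
def svBuild : Int → List (Int × Bool) → List (Int × Int)
  | _, [] => []
  | c, p :: ps => (if p.2 then [(c, c + p.1)] else []) ++ svBuild (c + p.1) ps

theorem foldA_eq_build (ps : List (Int × Bool)) :
    ∀ (c : Int) (acc : List (Int × Int)),
      (ps.foldl
        (fun s z => (s.1 + z.1, if z.2 == true then s.2 ++ [(s.1, s.1 + z.1)] else s.2))
        (c, acc)).2 = acc ++ svBuild c ps := by
  induction ps with
  | nil => intro c acc; simp [svBuild]
  | cons p ps ih =>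
    intro c acc
    rw [List.foldl_cons]
    cases hb : p.2
    · rw [if_neg (by decide : ¬ ((false == true) = true)),
          show acc ++ svBuild c (p :: ps) = acc ++ svBuild (c + p.1) ps from by
            simp [svBuild, hb]]
      exact ih _ _
    · rw [if_pos (by decide : ((true == true) = true)),
          show acc ++ svBuild c (p :: ps) = (acc ++ [(c, c + p.1)]) ++ svBuild (c + p.1) ps from by
            simp [svBuild, hb]]
      exact ih _ _

theorem alt_eq_build (ps : List (Int × Bool)) :
    ∀ (c : Int),
      (List.range ps.length).filterMap (fun i =>
        if (ps.getD i ((0 : Int), false)).2 == true then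
          some ((List.scanl (fun c p => c + p) c (ps.map Prod.fst)).getD i 0,
                (List.scanl (fun c p => c + p) c (ps.map Prod.fst)).getD i 0
                  + (ps.getD i ((0 : Int), false)).1)
        else none) = svBuild c ps := by
  induction ps with
  | nil => intro c; simp [svBuild]
  | cons p ps ih =>
    intro c
    rw [List.length_cons, List.range_succ_eq_map, List.filterMap_cons, List.filterMap_map]
    have hf : ((fun i =>
        if (((p :: ps).getD i ((0 : Int), false)).2 == true) then
          some ((List.scanl (fun c p => c + p) c ((p :: ps).map Prod.fst)).getD i 0,
                (List.scanl (fun c p => c + p) c ((p :: ps).map Prod.fst)).getD i 0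
                  + (((p :: ps).getD i ((0 : Int), false)).1))
        else none) ∘ Nat.succ)
        = (fun i =>
        if ((ps.getD i ((0 : Int), false)).2 == true) then
          some ((List.scanl (fun c p => c + p) (c + p.1) (ps.map Prod.fst)).getD i 0,
                (List.scanl (fun c p => c + p) (c + p.1) (ps.map Prod.fst)).getD i 0
                  + ((ps.getD i ((0 : Int), false)).1))
        else none) := by
      funext i
      simp only [Function.comp_apply, List.getD_cons_succ, List.map_cons, List.scanl_cons]
    rw [hf, ih]
    cases hb : p.2
    · simp [svBuild, hb]
    · simp [svBuild, hb, List.scanl_cons]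

-- ===== VERDICT (by name: the statement is the Claim_ definition above) =====
theorem silent_ranges_spec : Claim_equal_silent_ranges := by
  intro rle boolz _
  unfold Spec_silent_ranges silent_ranges silent_ranges_alt
  rw [foldA_eq_build, alt_eq_build]
  simp
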